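-- pv_equiv track=rewrite | github.com/haukuri/aoc | aoc/y2022/d06.py | find_end_of_first_unique_substring
-- ===== SOURCE A (Python) =====
-- def find_end_of_first_unique_substring(input: str, length: int) -> int:
--     for start_idx in range(0, len(input) - length):
--         end_idx = start_idx + length
--         section = input[start_idx:end_idx]
--         seen = set()
--         has_duplicates = False
--         for c in section:
--             has_duplicates = has_duplicates or c in seen
--             seen.add(c)
--         if not has_duplicates:
--             return end_idx
--     return -1
-- ===== SOURCE B (Python) =====
-- def find_end_of_first_unique_substring(input: str, length: int) -> int:
--     n = len(input)
--     if length >= n: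
--         return -1
--     counts = {}
--     distinct = 0
--     for c in input[:length]:
--         counts[c] = counts.get(c, 0) + 1
--         if counts[c] == 1:
--             distinct += 1
--     for end_idx in range(length, n):
--         if distinct == length:
--             return end_idx
--         c = input[end_idx]
--         counts[c] = counts.get(c, 0) + 1
--         if counts[c] == 1:
--             distinct += 1
--         d = input[end_idx - length]
--         counts[d] = counts[d] - 1
--         if counts[d] == 0:
--             distinct -= 1
--     return -1
-- ===== Notes on version B (the rewrite author's own statement) =====
-- stated objective: faster
-- what changed: A rescans every window with a fresh set (O(n*length)); B slides one window across the string once, maintaining per-char counts and a distinct counter (O(n)).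
-- outside the precondition, e.g. on find_end_of_first_unique_substring('aab', -1): A returns 0, B raises IndexError; on find_end_of_first_unique_substring('abc', -2): A returns -2, B raises IndexError
import Mathlib
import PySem

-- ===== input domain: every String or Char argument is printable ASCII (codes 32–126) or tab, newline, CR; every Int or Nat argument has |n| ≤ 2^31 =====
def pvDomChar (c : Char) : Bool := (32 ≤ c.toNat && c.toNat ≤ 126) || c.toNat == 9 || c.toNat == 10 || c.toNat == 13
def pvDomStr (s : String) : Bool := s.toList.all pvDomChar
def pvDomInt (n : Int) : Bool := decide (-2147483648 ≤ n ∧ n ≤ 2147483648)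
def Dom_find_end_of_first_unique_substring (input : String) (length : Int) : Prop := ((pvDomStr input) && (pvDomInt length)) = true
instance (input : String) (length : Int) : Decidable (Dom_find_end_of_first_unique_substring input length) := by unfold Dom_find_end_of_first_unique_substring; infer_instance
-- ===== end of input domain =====

-- B replaces A's fresh-set scan of every window by one sliding-window pass with
-- char counts (faster, asymptotic); A = B proved for 0 ≤ length.


-- ===== PORT A =====
-- inner loop of A: seen-set scan of one section, returning has_duplicates
def pvAInner (sec : List Char) : Bool :=
  (sec.foldl (fun (st : Bool × PySem.Set Char) c =>
    (st.1 || PySem.Set.contains st.2 c, PySem.Set.add st.2 c)) (false, PySem.Set.empty)).1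

-- the for-loop over range(0, len(input) - length), ported as an index loop
-- (Python's range is lazy; s is start_idx, stop is len(input) - length)
def pvALoop (l : List Char) (length s stop : Int) : Int :=
  if s < stop then
    let endIdx := s + length
    let sec := PySem.List.slice l (some s) (some endIdx)
    if pvAInner sec = false then endIdx else pvALoop l length (s + 1) stop
  else -1
termination_by (stop - s).toNat
decreasing_by omega

def find_end_of_first_unique_substring (input : String) (length : Int) : Int :=
  pvALoop input.toList length 0 ((input.toList.length : Int) - length)

-- ===== PORT B =====
-- the three add lines of B (shared by its init loop and its main loop):
-- counts[c] = counts.get(c, 0) + 1; if counts[c] == 1: distinct += 1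
def pvBAdd (st : PySem.Dict Char Int × Int) (c : Char) : PySem.Dict Char Int × Int :=
  let counts := st.1.modify c 0 (· + 1)
  let distinct := if counts.getD c 0 == 1 then st.2 + 1 else st.2
  (counts, distinct)

-- the for-loop over range(length, n), ported as an index loop (e is end_idx)
def pvBLoop (l : List Char) (length : Int) (counts : PySem.Dict Char Int)
    (distinct e stop : Int) : Int :=
  if e < stop then
    if distinct == length then e
    else
      let st1 := pvBAdd (counts, distinct) (PySem.List.pyGetD l e ' ')
      let d := PySem.List.pyGetD l (e - length) ' '
      let counts2 := st1.1.modify d 0 (· - 1)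
      let distinct2 := if counts2.getD d 0 == 0 then st1.2 - 1 else st1.2
      pvBLoop l length counts2 distinct2 (e + 1) stop
  else -1
termination_by (stop - e).toNat
decreasing_by omega

def find_end_of_first_unique_substring_alt (input : String) (length : Int) : Int :=
  let l := input.toList
  let n : Int := l.length
  if length ≥ n then -1
  else
    let init := (PySem.List.slice l none (some length)).foldl pvBAdd (PySem.Dict.empty, 0)
    pvBLoop l length init.1 init.2 length n

-- ===== PRECONDITION & SPEC =====
-- Pre_ excludes negative length, on which B's index input[end_idx - length] raises
-- IndexError while A returns accidental values of its negative-slice windows.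
def Pre_find_end_of_first_unique_substring (input : String) (length : Int) : Prop := 0 ≤ length
instance (input : String) (length : Int) : Decidable (Pre_find_end_of_first_unique_substring input length) := by unfold Pre_find_end_of_first_unique_substring; infer_instance

def pvWitness_find_end_of_first_unique_substring : String × Int := ("aabcd", 3)

def Spec_find_end_of_first_unique_substring (input : String) (length : Int) (out : Int) : Prop := out = find_end_of_first_unique_substring_alt input length
instance (input : String) (length : Int) (out : Int) : Decidable (Spec_find_end_of_first_unique_substring input length out) := by unfold Spec_find_end_of_first_unique_substring; infer_instance

-- ===== CLAIM (what is proved, stated in full; the proofs are below) =====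
def Claim_equal_find_end_of_first_unique_substring : Prop := ∀ (input : String) (length : Int), Dom_find_end_of_first_unique_substring input length → Pre_find_end_of_first_unique_substring input length → Spec_find_end_of_first_unique_substring input length (find_end_of_first_unique_substring input length)

-- ===== LEMMAS AND PROOFS =====

-- invariant of B's state: counts is the multiset of the window W, distinct its
-- number of distinct chars
def pvInv (counts : PySem.Dict Char Int) (distinct : Int) (W : List Char) : Prop :=
  (∀ x : Char, counts.getD x 0 = (W.count x : Int)) ∧ distinct = (W.toFinset.card : Int)

theorem pvCardIffNodup (l : List Char) : l.toFinset.card = l.length ↔ l.Nodup :=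
  Multiset.toFinset_card_eq_card_iff_nodup

theorem pvAInner_gen (w : List Char) (b : Bool) (s : PySem.Set Char) :
    ((w.foldl (fun (st : Bool × PySem.Set Char) c =>
      (st.1 || PySem.Set.contains st.2 c, PySem.Set.add st.2 c)) (b, s)).1 = true)
    ↔ (b = true ∨ ¬ w.Nodup ∨ ∃ x ∈ w, x ∈ s) := by
  induction w generalizing b s with
  | nil => simp
  | cons c cs ih =>
    simp only [List.foldl_cons, ih, List.nodup_cons, PySem.Set.mem_add,
      Bool.or_eq_true, PySem.Set.contains_iff, List.mem_cons]
    by_cases hb : b = true <;> by_cases hcs : c ∈ cs <;> by_cases hnd : cs.Nodup <;>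
        by_cases hcss : c ∈ s <;> simp [hb, hcs, hnd, hcss] <;>
      first
      | tauto
      | exact ⟨c, hcs, Or.inr rfl⟩
      | exact ⟨fun ⟨x, hx, h⟩ => ⟨x, hx, h.resolve_right (fun e => hcs (e ▸ hx))⟩,
              fun ⟨x, hx, h⟩ => ⟨x, hx, Or.inl h⟩⟩

theorem pvAInner_eq_false_iff (w : List Char) : pvAInner w = false ↔ w.Nodup := by
  unfold pvAInner
  rw [← Bool.not_eq_true, not_iff_comm, pvAInner_gen]
  simp [Iff.comm]

theorem pvBAdd_fst (counts : PySem.Dict Char Int) (distinct : Int) (c : Char) :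
    (pvBAdd (counts, distinct) c).1 = counts.modify c 0 (· + 1) := rfl

theorem pvBAdd_snd (counts : PySem.Dict Char Int) (distinct : Int) (c : Char) :
    (pvBAdd (counts, distinct) c).2
      = if (counts.modify c 0 (· + 1)).getD c 0 == 1 then distinct + 1 else distinct := rfl

-- one pvBAdd step extends the window by one char on the right
theorem pvBAdd_inv (counts : PySem.Dict Char Int) (distinct : Int) (W : List Char)
    (h : pvInv counts distinct W) (c : Char) :
    pvInv (pvBAdd (counts, distinct) c).1 (pvBAdd (counts, distinct) c).2 (W ++ [c]) := by
  obtain ⟨hc, hd⟩ := h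
  unfold pvInv
  rw [pvBAdd_fst, pvBAdd_snd]
  refine ⟨?_, ?_⟩
  · intro x
    rw [PySem.Dict.getD_modify]
    by_cases hx : x = c
    · rcases hx with rfl
      rw [if_pos rfl, hc x]
      simp [List.count_append]
    · have hx' : ¬ c = x := fun h => hx h.symm
      rw [if_neg hx, hc x]
      simp [List.count_append, List.count_cons, hx']
  · have hfin : (W ++ [c]).toFinset = insert c W.toFinset := by simp
    rw [hfin, PySem.Dict.getD_modify_self, hc c]
    by_cases hmem : c ∈ W
    · have h1 : (((W.count c : Int) + 1) == 1) = false := by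
        have := List.count_pos_iff.mpr hmem
        simp only [beq_eq_false_iff_ne, ne_eq]
        omega
      rw [h1, if_neg Bool.false_ne_true, hd,
        Finset.insert_eq_self.mpr (List.mem_toFinset.mpr hmem)]
    · have h1 : (((W.count c : Int) + 1) == 1) = true := by
        have := List.count_eq_zero_of_not_mem hmem
        simp only [beq_iff_eq]
        omega
      rw [h1, if_pos rfl, hd, Finset.card_insert_of_notMem (by simpa using hmem)]
      push_cast; ring

theorem pvBInit_inv (w : List Char) (counts : PySem.Dict Char Int) (distinct : Int)
    (W : List Char) (h : pvInv counts distinct W) :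
    pvInv (w.foldl pvBAdd (counts, distinct)).1 (w.foldl pvBAdd (counts, distinct)).2
      (W ++ w) := by
  induction w generalizing counts distinct W with
  | nil => simpa using h
  | cons c cs ih =>
    have h1 := pvBAdd_inv counts distinct W h c
    have h2 := ih (pvBAdd (counts, distinct) c).1 (pvBAdd (counts, distinct) c).2
      (W ++ [c]) h1
    simpa using h2

-- the main simultaneous induction: at window start s both loops agree
theorem pvMain (l : List Char) (L : Int) (hL : 0 ≤ L) (fuel : Nat) :
    ∀ (s : Int) (counts : PySem.Dict Char Int) (distinct : Int),
    0 ≤ s → s + fuel = (l.length : Int) - L →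
    pvInv counts distinct ((l.drop s.toNat).take L.toNat) →
    pvALoop l L s ((l.length : Int) - L)
      = pvBLoop l L counts distinct (s + L) (l.length : Int) := by
  induction fuel with
  | zero =>
    intro s counts distinct hs hsum _
    rw [pvALoop, if_neg (by omega), pvBLoop, if_neg (by omega)]
  | succ m ih =>
    intro s counts distinct hs hsum hinv
    have hlt : s < (l.length : Int) - L := by omega
    have hlt2 : s + L < (l.length : Int) := by omega
    rw [pvALoop, if_pos hlt, pvBLoop, if_pos hlt2]
    obtain ⟨hcount, hdist⟩ := hinv
    have hak : s.toNat + L.toNat < l.length := by omega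
    set W := (l.drop s.toNat).take L.toNat with hW
    have hWlen : W.length = L.toNat := by
      simp only [hW, List.length_take, List.length_drop]; omega
    have hslice : PySem.List.slice l (some s) (some (s + L)) = W := by
      rw [PySem.List.slice_toNat l hs (by omega)]
      have h1 : (s + L).toNat = s.toNat + L.toNat := by omega
      rw [h1]
      simp [hW, Nat.add_sub_cancel_left]
    have hiff : (pvAInner W = false) ↔ (distinct == L) = true := by
      rw [pvAInner_eq_false_iff, ← pvCardIffNodup, hWlen, beq_iff_eq, hdist]
      constructor <;> intro h <;> omega
    simp only [hslice]
    by_cases hret : (distinct == L) = true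
    · rw [if_pos (hiff.mpr hret), if_pos hret]
    · rw [if_neg (fun h => hret (hiff.mp h)), if_neg hret]
      -- distinct ≠ L, so the window is nonempty
      have hk1 : 1 ≤ L.toNat := by
        by_contra hk0
        apply hret
        have hkz : L.toNat = 0 := by omega
        have hWnil : W = [] := by simp [hW, hkz]
        rw [beq_iff_eq, hdist, hWnil]
        simp; omega
      -- decompose the window: W = d :: mid,  next window = mid ++ [c]
      have hgd : l.getD s.toNat ' ' = l[s.toNat]'(by omega) := List.getD_eq_getElem l ' ' (by omega)
      have hdrop : l.drop s.toNat = l.getD s.toNat ' ' :: l.drop (s.toNat + 1) := by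
        rw [hgd]
        exact List.drop_eq_getElem_cons (by omega)
      set mid := (l.drop (s.toNat + 1)).take (L.toNat - 1) with hmid
      have hWdec : W = l.getD s.toNat ' ' :: mid := by
        obtain ⟨k', hk'⟩ : ∃ k', L.toNat = k' + 1 := ⟨L.toNat - 1, by omega⟩
        rw [hW, hdrop, hk']
        simp [hmid, hk']
      have hW' : (l.drop (s + 1).toNat).take L.toNat
          = mid ++ [l.getD (s.toNat + L.toNat) ' '] := by
        obtain ⟨k', hk'⟩ : ∃ k', L.toNat = k' + 1 := ⟨L.toNat - 1, by omega⟩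
        have h1 : (s + 1).toNat = s.toNat + 1 := by omega
        have h2 : s.toNat + L.toNat = s.toNat + 1 + k' := by omega
        rw [h1, h2, hk', List.take_succ]
        congr 1
        · rw [hmid, hk']
          simp
        · rw [List.getElem?_drop, List.getElem?_eq_getElem (by omega),
            List.getD_eq_getElem l ' ' (by omega)]
          rfl
      have hcget : PySem.List.pyGetD l (s + L) ' ' = l.getD (s.toNat + L.toNat) ' ' := by
        have h1 : s + L = ((s.toNat + L.toNat : Nat) : Int) := by push_cast; omega
        rw [h1, PySem.List.pyGetD_natCast]
      have hdget : PySem.List.pyGetD l (s + L - L) ' ' = l.getD s.toNat ' ' := by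
        have h1 : s + L - L = ((s.toNat : Nat) : Int) := by push_cast; omega
        rw [h1, PySem.List.pyGetD_natCast]
      set c := l.getD (s.toNat + L.toNat) ' ' with hc
      set d := l.getD s.toNat ' ' with hd'
      rw [hcget, hdget, pvBAdd_fst, pvBAdd_snd]
      set C1 := counts.modify c 0 (· + 1) with hC1
      set D1 := (if C1.getD c 0 == 1 then distinct + 1 else distinct) with hD1
      set C2 := C1.modify d 0 (· - 1) with hC2
      set D2 := (if C2.getD d 0 == 0 then D1 - 1 else D1) with hD2
      have harith : s + L + 1 = (s + 1) + L := by ring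
      rw [harith]
      apply ih (s + 1) C2 D2 (by omega) (by omega)
      rw [hW']
      have hCc : C1.getD c 0 = (W.count c : Int) + 1 := by
        rw [hC1, PySem.Dict.getD_modify_self, hcount c]
      have hC1d : ∀ x : Char, C1.getD x 0 = (W.count x : Int) + (if x = c then 1 else 0) := by
        intro x
        rw [hC1, PySem.Dict.getD_modify]
        by_cases hx : x = c <;> simp [hx, hcount x, hcount c] <;> omega
      have hC2x : ∀ x : Char, C2.getD x 0
          = (W.count x : Int) + (if x = c then 1 else 0) - (if x = d then 1 else 0) := by
        intro x
        rw [hC2, PySem.Dict.getD_modify]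
        by_cases hx : x = d <;> simp [hx, hC1d] <;> omega
      refine ⟨?_, ?_⟩
      · intro x
        rw [hC2x x]
        have hWc : (W.count x : Int) = (if x = d then 1 else 0) + (mid.count x : Int) := by
          rw [hWdec, List.count_cons]
          by_cases hx : x = d <;> simp [hx] <;> first | omega | exact Ne.symm hx
        have hW'c : ((mid ++ [c]).count x : Int)
            = (mid.count x : Int) + (if x = c then 1 else 0) := by
          rw [List.count_append]
          by_cases hx : x = c <;> simp [hx] <;>
            first
            | omega
            | exact Ne.symm hx
            | exact List.count_eq_zero_of_not_mem (by simp [hx])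
        rw [hWc, hW'c]
        ring
      · -- the distinct counter
        have hWfin : W.toFinset = insert d mid.toFinset := by rw [hWdec]; simp
        have hW'fin : (mid ++ [c]).toFinset = insert c mid.toFinset := by simp
        rw [hW'fin, hD2, hD1, hCc, hC2x d, hdist, hWfin]
        simp only [beq_iff_eq]
        have hWcd : (W.count d : Int) = 1 + (mid.count d : Int) := by
          rw [hWdec]
          simp [List.count_cons]
          omega
        have hWcc : (W.count c : Int) = (mid.count c : Int) + (if c = d then 1 else 0) := by
          rw [hWdec, List.count_cons]
          by_cases hcd : c = d <;> simp [hcd] <;> first | omega | exact Ne.symm hcd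
        have hci : ((insert c mid.toFinset).card : Int)
            = (mid.toFinset.card : Int) + (if c ∈ mid then 0 else 1) := by
          by_cases hcm : c ∈ mid
          · rw [if_pos hcm, Finset.insert_eq_self.mpr (List.mem_toFinset.mpr hcm)]; ring
          · rw [if_neg hcm, Finset.card_insert_of_notMem (by simpa using hcm)]; push_cast; ring
        have hdi : ((insert d mid.toFinset).card : Int)
            = (mid.toFinset.card : Int) + (if d ∈ mid then 0 else 1) := by
          by_cases hdm : d ∈ mid
          · rw [if_pos hdm, Finset.insert_eq_self.mpr (List.mem_toFinset.mpr hdm)]; ring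
          · rw [if_neg hdm, Finset.card_insert_of_notMem (by simpa using hdm)]; push_cast; ring
        rw [hWcc, hWcd, hci, hdi]
        by_cases hcd : c = d
        · rw [hcd]
          by_cases hdm : d ∈ mid
          all_goals first
            | have hnd : 0 < List.count d mid := List.count_pos_iff.mpr hdm
            | have hnd : List.count d mid = 0 := List.count_eq_zero_of_not_mem hdm
          all_goals simp only [hdm, eq_self_iff_true, if_true, if_false, ite_true, ite_false]
          all_goals split_ifs <;> omega
        · have hdc : ¬ (d = c) := fun h => hcd h.symm
          by_cases hcm : c ∈ mid <;> by_cases hdm : d ∈ mid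
          all_goals first
            | have hnc : 0 < List.count c mid := List.count_pos_iff.mpr hcm
            | have hnc : List.count c mid = 0 := List.count_eq_zero_of_not_mem hcm
          all_goals first
            | have hnd : 0 < List.count d mid := List.count_pos_iff.mpr hdm
            | have hnd : List.count d mid = 0 := List.count_eq_zero_of_not_mem hdm
          all_goals simp only [hcd, hdc, hcm, hdm, eq_self_iff_true, if_true, if_false,
            ite_true, ite_false]
          all_goals split_ifs <;> omega

-- ===== VERDICT (by name: the statement is the Claim_ definition above) =====
theorem find_end_of_first_unique_substring_spec : Claim_equal_find_end_of_first_unique_substring := by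
  intro input length _ hpre
  unfold Spec_find_end_of_first_unique_substring
  unfold find_end_of_first_unique_substring find_end_of_first_unique_substring_alt
  simp only []
  by_cases hge : length ≥ (input.toList.length : Int)
  · rw [if_pos hge, pvALoop, if_neg (by omega)]
  · rw [if_neg hge]
    have hpre' : (0 : Int) ≤ length := hpre
    have hinit : pvInv
        ((PySem.List.slice input.toList none (some length)).foldl pvBAdd (PySem.Dict.empty, 0)).1
        ((PySem.List.slice input.toList none (some length)).foldl pvBAdd (PySem.Dict.empty, 0)).2
        ((input.toList.drop (0 : Int).toNat).take length.toNat) := by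
      have h0 : pvInv PySem.Dict.empty 0 [] := by
        constructor
        · intro x; simp [PySem.Dict.getD_empty]
        · simp
      have h1 := pvBInit_inv (PySem.List.slice input.toList none (some length))
        PySem.Dict.empty 0 [] h0
      rw [PySem.List.slice_to input.toList hpre'] at h1 ⊢
      simpa using h1
    have := pvMain input.toList length hpre' ((input.toList.length : Int) - length).toNat 0
      ((PySem.List.slice input.toList none (some length)).foldl pvBAdd (PySem.Dict.empty, 0)).1
      ((PySem.List.slice input.toList none (some length)).foldl pvBAdd (PySem.Dict.empty, 0)).2
      (by omega) (by omega) hinit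
    rw [zero_add] at this
    exact this
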